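-- pv_equiv track=rewrite | github.com/MisterNicoLarson/NLP-and-Murder- | scriptsWkw/WhoKillWho5.py | purge
-- ===== SOURCE A (Python) =====
-- def purge(doc):
--
--     result = "";
--     flag = True;
--
--     for mot in doc:
--
--         #on enlève les contenues informatiques du style {%fbhjeiud} ou <ref></ref>
--         if mot == '{' or mot == '<':
--             flag = False;
--         elif mot == '}' or mot == '>':
--             flag = True;
--         elif flag:
--             #on enlève aussi les signes comme :  ' , [ , ] , = .
--             if (mot not in ['\'','[',']','=']):
--                 result += mot;
--
--
--     #la fonction renvoie enfin le texte "nettoyé"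
--     return result
-- ===== SOURCE B (Python) =====
-- def purge(doc):
--     out = []
--     i, n = 0, len(doc)
--     while i < n:
--         c = doc[i]
--         if c == '{' or c == '<':
--             j = i + 1
--             while j < n and doc[j] != '}' and doc[j] != '>':
--                 j += 1
--             i = j + 1
--         elif c not in "}>'[]=":
--             out.append(c)
--             i += 1
--         else:
--             i += 1
--     return ''.join(out)
-- ===== Notes on version B (the rewrite author's own statement) =====
-- stated objective: simpler
-- what changed: Replaces A's per-character boolean-flag state machine with an index-based scan that skips each whole markup region in one inner jump and filters the stray special characters, joining the kept characters at the end.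
import Mathlib
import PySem

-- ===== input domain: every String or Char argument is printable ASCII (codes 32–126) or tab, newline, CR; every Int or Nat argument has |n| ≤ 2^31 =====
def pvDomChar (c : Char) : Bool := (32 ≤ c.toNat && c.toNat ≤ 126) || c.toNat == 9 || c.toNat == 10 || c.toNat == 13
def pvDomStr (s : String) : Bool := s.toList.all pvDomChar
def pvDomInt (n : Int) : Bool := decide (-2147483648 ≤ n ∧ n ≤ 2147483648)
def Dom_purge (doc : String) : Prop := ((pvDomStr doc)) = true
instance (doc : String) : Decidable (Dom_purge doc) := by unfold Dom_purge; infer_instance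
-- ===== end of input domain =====

-- B replaces A's per-character boolean-flag state machine by region skipping (jump past each
-- whole markup block, filter stray specials) — simpler structure, same cost;
-- return-value equivalence (neither program mutates its argument).

-- ===== PORT A =====
-- A: one pass keeping a boolean flag; chars kept only while flag is true and the char is
-- not in ['\'','[',']','='].
def purgeGoA : List Char → List Char → Bool → List Char
  | [], res, _ => res
  | c :: cs, res, flag =>
    if c = '{' ∨ c = '<' then purgeGoA cs res false
    else if c = '}' ∨ c = '>' then purgeGoA cs res true
    else if flag then
      if ¬ (c = '\'' ∨ c = '[' ∨ c = ']' ∨ c = '=') then purgeGoA cs (res ++ [c]) flag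
      else purgeGoA cs res flag
    else purgeGoA cs res flag

def purge (doc : String) : String := String.ofList (purgeGoA doc.toList [] true)

-- ===== PORT B =====
-- B's inner while loop: drop chars up to and including the next '}'/'>' (or all, if none).
def purgeSkip : List Char → List Char
  | [] => []
  | c :: cs => if c = '}' ∨ c = '>' then cs else purgeSkip cs

-- termination helper for purgeGoB (cited by its decreasing_by)
theorem purgeSkip_length_le (l : List Char) : (purgeSkip l).length ≤ l.length := by
  induction l with
  | nil => simp [purgeSkip]
  | cons c cs ih => rw [purgeSkip]; split <;> simp <;> omega

-- B's outer while loop: on '{'/'<' skip the whole region, otherwise filter specials.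
def purgeGoB : List Char → List Char
  | [] => []
  | c :: cs =>
    if c = '{' ∨ c = '<' then purgeGoB (purgeSkip cs)
    else if c = '}' ∨ c = '>' ∨ c = '\'' ∨ c = '[' ∨ c = ']' ∨ c = '=' then purgeGoB cs
    else c :: purgeGoB cs
termination_by l => l.length
decreasing_by
  all_goals simp only [List.length_cons]
  all_goals first
    | exact Nat.lt_succ_of_le (purgeSkip_length_le _)
    | omega

def purge_alt (doc : String) : String := String.ofList (purgeGoB doc.toList)

-- ===== PRECONDITION & SPEC =====
def Spec_purge (doc : String) (out : String) : Prop := out = purge_alt doc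
instance (doc : String) (out : String) : Decidable (Spec_purge doc out) := by unfold Spec_purge; infer_instance

-- ===== CLAIM (what is proved, stated in full; the proofs are below) =====
def Claim_equal_purge : Prop := ∀ (doc : String), Dom_purge doc → Spec_purge doc (purge doc)

-- ===== LEMMAS AND PROOFS =====

-- A's loop with flag=true computes B's outer loop; with flag=false it computes B's outer
-- loop applied after B's region skip.
theorem purgeGoA_eq (l : List Char) :
    (∀ res, purgeGoA l res true = res ++ purgeGoB l) ∧
    (∀ res, purgeGoA l res false = res ++ purgeGoB (purgeSkip l)) := by
  induction l with
  | nil => simp [purgeGoA, purgeGoB, purgeSkip]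
  | cons c cs ih =>
    obtain ⟨ihT, ihF⟩ := ih
    constructor <;> intro res
    · by_cases h1 : c = '{' ∨ c = '<'
      · rw [purgeGoA, if_pos h1, purgeGoB, if_pos h1, ihF]
      · by_cases h2 : c = '}' ∨ c = '>'
        · rw [purgeGoA, if_neg h1, if_pos h2, purgeGoB, if_neg h1,
            if_pos (by tauto), ihT]
        · by_cases h3 : c = '\'' ∨ c = '[' ∨ c = ']' ∨ c = '='
          · rw [purgeGoA, if_neg h1, if_neg h2, if_pos rfl, if_neg (by tauto),
              purgeGoB, if_neg h1, if_pos (by tauto), ihT]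
          · rw [purgeGoA, if_neg h1, if_neg h2, if_pos rfl, if_pos (by tauto),
              purgeGoB, if_neg h1, if_neg (by tauto), ihT, List.append_assoc]
            rfl
    · by_cases h1 : c = '{' ∨ c = '<'
      · have hc : ¬ (c = '}' ∨ c = '>') := by rcases h1 with h | h <;> simp [h]
        rw [purgeGoA, if_pos h1, purgeSkip, if_neg hc, ihF]
      · by_cases h2 : c = '}' ∨ c = '>'
        · rw [purgeGoA, if_neg h1, if_pos h2, purgeSkip, if_pos h2, ihT]
        · rw [purgeGoA, if_neg h1, if_neg h2, if_neg (by simp), purgeSkip,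
            if_neg h2, ihF]

theorem purge_eq (doc : String) : purge doc = purge_alt doc := by
  unfold purge purge_alt
  rw [(purgeGoA_eq doc.toList).1]
  simp

-- ===== VERDICT (by name: the statement is the Claim_ definition above) =====
theorem purge_spec : Claim_equal_purge := by
  intro doc _
  unfold Spec_purge
  exact purge_eq doc
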